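-- pv_equiv track=rewrite | github.com/bekirdag/ades | src/ades/packs/alias_analysis.py | _build_retained_label_counts
-- ===== SOURCE A (Python) =====
-- from typing import Any, Callable, Iterable, Iterator
--
-- def _build_retained_label_counts(labels: Iterable[str]) -> dict[str, int]:
--     counts: dict[str, int] = {}
--     for label in labels:
--         counts[label] = counts.get(label, 0) + 1
--     return {
--         label: counts[label]
--         for label in sorted(counts, key=lambda value: (value.casefold(), value))
--     }
-- ===== SOURCE B (Python) =====
-- def _build_retained_label_counts(labels):
--     # Sort the whole label stream once by (casefold, value), then scan it
--     # two-pointer style: each maximal run of equal labels becomes one entry.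
--     ordered = sorted(labels, key=lambda value: (value.casefold(), value))
--     result = {}
--     i = 0
--     n = len(ordered)
--     while i < n:
--         label = ordered[i]
--         j = i + 1
--         while j < n and ordered[j] == label:
--             j += 1
--         result[label] = j - i
--         i = j
--     return result
-- ===== Notes on version B (the rewrite author's own statement) =====
-- stated objective: alternative
-- what changed: Instead of counting into a dict and then sorting the distinct keys, B sorts the whole label stream once by (casefold, value) and scans it with a two-pointer run scan, emitting one (label, run length) entry per maximal run; no counts dict is maintained.
import Mathlib
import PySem

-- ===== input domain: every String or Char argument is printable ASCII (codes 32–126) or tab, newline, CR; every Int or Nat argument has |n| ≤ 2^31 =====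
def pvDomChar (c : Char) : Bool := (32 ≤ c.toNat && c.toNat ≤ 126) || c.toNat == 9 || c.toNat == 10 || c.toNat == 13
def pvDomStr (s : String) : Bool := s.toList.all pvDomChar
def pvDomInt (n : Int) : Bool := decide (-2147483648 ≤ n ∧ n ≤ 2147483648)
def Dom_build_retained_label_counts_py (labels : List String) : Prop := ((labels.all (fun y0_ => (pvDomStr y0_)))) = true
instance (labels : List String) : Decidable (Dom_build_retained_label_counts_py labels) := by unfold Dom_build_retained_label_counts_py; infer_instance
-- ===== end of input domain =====

-- B sorts the whole label stream once by (casefold, value) and scans runs, instead of A's count-into-dict-then-sort-the-distinct-keys; alternative decomposition, same results.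


-- ===== PORT A =====
-- str.casefold is ported as PySem.Str.lower: exact on the ASCII domain Dom_ admits.
-- counts[label] in the comprehension is ported as getD (the key is always present, so no KeyError).
def build_retained_label_counts_py (labels : List String) : List (String × Int) :=
  let counts : PySem.Dict String Int :=
    labels.foldl (fun d label => d.insert label (d.getD label 0 + 1)) PySem.Dict.empty
  ((PySem.List.sorted2 counts.keys (fun value => PySem.Str.lower value) (fun value => value) false).foldl
      (fun d label => d.insert label (counts.getD label 0)) PySem.Dict.empty).items

-- ===== PORT B =====
-- the two-pointer run scan of Source B: the inner 'while ordered[j] == label' is takeWhile,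
-- advancing i to j is dropWhile; one (label, run length) entry per maximal run.
def pvRunScan : List String → List (String × Int)
  | [] => []
  | x :: xs =>
      (x, 1 + ((xs.takeWhile (· == x)).length : Int)) :: pvRunScan (xs.dropWhile (· == x))
termination_by l => l.length
decreasing_by
  have := (List.dropWhile_sublist (l := xs) (p := (· == x))).length_le
  simp; omega

def build_retained_label_counts_py_alt (labels : List String) : List (String × Int) :=
  pvRunScan (PySem.List.sorted2 labels (fun value => PySem.Str.lower value) (fun value => value) false)

-- ===== PRECONDITION & SPEC =====
def Spec_build_retained_label_counts_py (labels : List String) (out : List (String × Int)) : Prop := out = build_retained_label_counts_py_alt labels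
instance (labels : List String) (out : List (String × Int)) : Decidable (Spec_build_retained_label_counts_py labels out) := by unfold Spec_build_retained_label_counts_py; infer_instance

-- ===== CLAIM (what is proved, stated in full; the proofs are below) =====
def Claim_equal_build_retained_label_counts_py : Prop := ∀ (labels : List String), Dom_build_retained_label_counts_py labels → Spec_build_retained_label_counts_py labels (build_retained_label_counts_py labels)

-- ===== LEMMAS AND PROOFS =====

-- sorted2 (tuple key) is sorted with the lexicographic key
theorem pv_sorted2_eq_sorted_lex {α κ₁ κ₂ : Type} [LinearOrder κ₁] [LinearOrder κ₂]
    (xs : List α) (k1 : α → κ₁) (k2 : α → κ₂) :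
    PySem.List.sorted2 xs k1 k2 false = PySem.List.sorted xs (fun v => toLex (k1 v, k2 v)) false := by
  unfold PySem.List.sorted2 PySem.List.sorted
  simp only [if_neg (by simp : ¬ (false = true))]
  have h : (fun a b => decide (k1 a < k1 b) || (!decide (k1 b < k1 a) && decide (k2 a < k2 b)))
      = fun a b => decide (toLex (k1 a, k2 a) < toLex (k1 b, k2 b)) := by
    funext a b
    rcases lt_trichotomy (k1 a) (k1 b) with h | h | h
    · simp [Prod.Lex.toLex_lt_toLex, h]
    · simp [Prod.Lex.toLex_lt_toLex, h]
    · simp [Prod.Lex.toLex_lt_toLex, h, not_lt_of_gt h, h.ne']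
  rw [h]

theorem pv_ofList_sublist {α : Type} [BEq α] [LawfulBEq α] (l : List α) : (PySem.Set.ofList l).Sublist l := by
  induction l with
  | nil => simp [PySem.Set.ofList_nil]
  | cons x xs ih =>
      rw [PySem.Set.ofList_cons]
      unfold PySem.Set.discard
      exact (List.Sublist.trans List.filter_sublist ih).cons_cons x

theorem pv_discard_of_not_mem {α : Type} [BEq α] [LawfulBEq α] (s : PySem.Set α) (x : α)
    (h : x ∉ s) : PySem.Set.discard s x = s := by
  unfold PySem.Set.discard
  apply List.filter_eq_self.mpr
  intro y hy
  simp only [Bool.not_eq_eq_eq_not, Bool.not_true, beq_eq_false_iff_ne]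
  exact fun hyx => h (hyx ▸ hy)

-- first occurrences of a run-prefixed list: set(x :: t ++ d) = x :: set(d) when t is all x's and x ∉ d
theorem pv_ofList_run {α : Type} [BEq α] [LawfulBEq α] (t d : List α) (x : α)
    (ht : ∀ a ∈ t, a = x) (hd : x ∉ d) :
    PySem.Set.ofList (x :: (t ++ d)) = x :: PySem.Set.ofList d := by
  rw [PySem.Set.ofList_cons]
  congr 1
  induction t with
  | nil =>
      simp only [List.nil_append]
      exact pv_discard_of_not_mem _ _ (fun h => hd ((PySem.Set.mem_ofList _ _).mp h))
  | cons y t' ih =>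
      have hy : y = x := ht y (List.mem_cons_self)
      subst hy
      rw [List.cons_append, PySem.Set.ofList_cons]
      unfold PySem.Set.discard
      simp only [List.filter_cons, BEq.rfl, Bool.not_true, Bool.false_eq_true,
        List.filter_filter]
      have : ∀ a ∈ t', a = y := fun a ha => ht a (List.mem_cons_of_mem _ ha)
      have := ih this
      unfold PySem.Set.discard at this
      simpa using this

theorem pv_head_dropWhile_false {α : Type} (p : α → Bool) (l : List α) (y : α) (d' : List α)
    (h : l.dropWhile p = y :: d') : p y = false := by
  induction l with
  | nil => simp at h
  | cons a l ih =>
      rw [List.dropWhile_cons] at h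
      by_cases hpa : p a = true
      · rw [if_pos hpa] at h; exact ih h
      · rw [if_neg hpa] at h
        cases h
        simpa using hpa

-- the core grouping lemma: on a key-sorted list the run scan produces
-- (first occurrences, multiplicities)
theorem pv_runScan_eq {κ : Type} [LinearOrder κ] (key : String → κ)
    (hinj : Function.Injective key) :
    ∀ L : List String, L.Pairwise (fun a b => key a ≤ key b) →
      pvRunScan L = (PySem.Set.ofList L).map (fun k => (k, (L.count k : Int))) := by
  intro L
  induction L using pvRunScan.induct with
  | case1 => intro _; simp [pvRunScan, PySem.Set.ofList_nil]
  | case2 x xs ih =>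
      intro hp
      set t := xs.takeWhile (· == x) with hT
      set d := xs.dropWhile (· == x) with hD
      have hxs : xs = t ++ d := (List.takeWhile_append_dropWhile).symm
      have ht : ∀ a ∈ t, a = x := by
        intro a ha
        have := List.mem_takeWhile_imp ha
        exact eq_of_beq this
      have hpxs : xs.Pairwise (fun a b => key a ≤ key b) := hp.of_cons
      have hpd : d.Pairwise (fun a b => key a ≤ key b) := by
        rw [hD]; exact hpxs.sublist (List.dropWhile_sublist _)
      have hxd : x ∉ d := by
        intro hxmem
        cases hde : d with
        | nil => rw [hde] at hxmem; simp at hxmem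
        | cons y d' =>
            have hde' : xs.dropWhile (· == x) = y :: d' := by rw [← hD]; exact hde
            have hyx : (y == x) = false := pv_head_dropWhile_false (· == x) xs y d' hde'
            have hyne : y ≠ x := by simpa using hyx
            rw [hde] at hxmem
            rcases List.mem_cons.mp hxmem with h | h
            · exact hyne h.symm
            · -- x occurs after y in d; sortedness forces key x = key y
              have h1 : key y ≤ key x := by
                rw [hde] at hpd
                exact (List.pairwise_cons.mp hpd).1 x h
              have h2 : key x ≤ key y := by
                have hyxs : y ∈ xs := hxs ▸ (List.mem_append.mpr (Or.inr (hde ▸ List.mem_cons_self)))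
                exact (List.pairwise_cons.mp hp).1 y hyxs
              exact hyne (hinj (le_antisymm h1 h2))
      have hcx_t : t.count x = t.length := List.count_eq_length.mpr (fun b hb => (ht b hb).symm)
      have hcx_d : d.count x = 0 := List.count_eq_zero.mpr hxd
      have hstep : pvRunScan (x :: xs) = (x, 1 + (t.length : Int)) :: pvRunScan d := by
        rw [pvRunScan]
      rw [hstep, ih hpd, hxs, pv_ofList_run t d x ht hxd]
      simp only [List.map_cons, List.count_cons_self, List.count_append, hcx_t, hcx_d]
      congr 1
      · simp only [Prod.mk.injEq, true_and]; push_cast; ring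
      · apply List.map_congr_left
        intro k hk
        have hkd : k ∈ d := (PySem.Set.mem_ofList _ _).mp hk
        have hknx : k ≠ x := fun h => hxd (h ▸ hkd)
        have hkt : t.count k = 0 :=
          List.count_eq_zero.mpr (fun hkt => hknx (ht k hkt))
        simp [List.count_append, hkt, Ne.symm hknx]

theorem pv_sorted2_strings (xs : List String) :
    PySem.List.sorted2 xs (fun value => PySem.Str.lower value) (fun value => value) false
      = PySem.List.sorted xs (fun v => toLex (PySem.Str.lower v, v)) false :=
  pv_sorted2_eq_sorted_lex xs _ _

-- the sort key, once and for all
theorem pv_key_inj : Function.Injective (fun v : String => toLex (PySem.Str.lower v, v)) := by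
  intro a b h
  simpa using congrArg (fun x => (ofLex x).2) h

theorem build_retained_label_counts_py_spec_aux (labels : List String) :
    build_retained_label_counts_py labels = build_retained_label_counts_py_alt labels := by
  classical
  unfold build_retained_label_counts_py build_retained_label_counts_py_alt
  dsimp only
  rw [PySem.Dict.foldl_insert_getD_add_one_eq_counter]
  rw [pv_sorted2_strings, pv_sorted2_strings]
  set key : String → Lex (String × String) := fun v => toLex (PySem.Str.lower v, v) with hkey
  set L := PySem.List.sorted labels key false with hL
  have hLperm : L.Perm labels := PySem.List.sorted_perm _ _ _
  have hLpair : L.Pairwise (fun a b => key a ≤ key b) := PySem.List.sorted_pairwise _ _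
  -- B side
  have hB : pvRunScan L = (PySem.Set.ofList L).map (fun k => (k, (L.count k : Int))) :=
    pv_runScan_eq key pv_key_inj L hLpair
  -- A side: the second fold over fresh distinct keys appends its pairs
  have hkeys : (PySem.Dict.counter labels).keys = PySem.Set.ofList labels :=
    PySem.Dict.keys_counter labels
  have hnodupS : (PySem.Set.ofList labels).Nodup := PySem.Set.nodup_ofList labels
  have hsortnodup : (PySem.List.sorted (PySem.Dict.counter labels).keys key false).Nodup := by
    rw [hkeys]
    exact (PySem.List.sorted_perm _ _ _).nodup_iff.mpr hnodupS
  have hA := PySem.Dict.items_foldl_insert_fresh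
      (l := PySem.List.sorted (PySem.Dict.counter labels).keys key false)
      (k := fun a => a) (v := fun a => (PySem.Dict.counter labels).getD a 0)
      (d := PySem.Dict.empty)
      (by intro a _; exact PySem.Dict.contains_empty a)
      (by simpa using hsortnodup)
  simp only [hA]
  -- identify the sorted distinct keys with the first occurrences of the sorted stream
  have hsetEq : PySem.List.sorted (PySem.Dict.counter labels).keys key false
      = PySem.Set.ofList L := by
    rw [hkeys]
    apply PySem.List.sorted_eq_of_perm_of_pairwise_lt
    · exact (List.perm_ext_iff_of_nodup (PySem.Set.nodup_ofList L) hnodupS).mpr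
        (by intro x
            rw [PySem.Set.mem_ofList, PySem.Set.mem_ofList]
            exact ⟨fun h => hLperm.mem_iff.mp h, fun h => hLperm.mem_iff.mpr h⟩)
    · have hsub : (PySem.Set.ofList L).Sublist L := pv_ofList_sublist L
      have hple : (PySem.Set.ofList L).Pairwise (fun a b => key a ≤ key b) :=
        hLpair.sublist hsub
      have hne : (PySem.Set.ofList L).Pairwise (fun a b => a ≠ b) := PySem.Set.nodup_ofList L
      exact (hple.and hne).imp (fun {a b} h =>
        lt_of_le_of_ne h.1 (fun hk => h.2 (pv_key_inj hk)))
  rw [hsetEq, hB]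
  simp only [PySem.Dict.empty, List.nil_append]
  apply List.map_congr_left
  intro k _
  have : (PySem.Dict.counter labels).getD k 0 = (labels.count k : Int) :=
    PySem.Dict.getD_counter labels k
  rw [this, hLperm.count_eq]

-- ===== VERDICT (by name: the statement is the Claim_ definition above) =====
theorem build_retained_label_counts_py_spec : Claim_equal_build_retained_label_counts_py := by
  intro labels _
  exact build_retained_label_counts_py_spec_aux labels
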